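-- pv_equiv track=rewrite | github.com/Y0306S/betterwiser_briefs_agent | src/gatherers/history_loader.py | _get_prior_months
-- ===== SOURCE A (Python) =====
-- def _get_prior_months(current_month: str, count: int = 3) -> list[str]:
--     """
--     Return list of YYYY-MM strings for the `count` months preceding current_month.
--
--     Examples:
--         _get_prior_months("2026-03", 3) → ["2026-02", "2026-01", "2025-12"]
--     """
--     year, month = int(current_month[:4]), int(current_month[5:7])
--     prior: list[str] = []
--     for _ in range(count):
--         month -= 1
--         if month == 0:
--             month = 12
--             year -= 1
--         prior.append(f"{year:04d}-{month:02d}")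
--     return prior
-- ===== SOURCE B (Python) =====
-- def _get_prior_months(current_month: str, count: int = 3) -> list[str]:
--     """Same result via absolute month-index arithmetic instead of decrement-with-carry."""
--     year, month = int(current_month[:4]), int(current_month[5:7])
--     total = year * 12 + (month - 1)
--     return [
--         "{:04d}-{:02d}".format((total - k) // 12, (total - k) % 12 + 1)
--         for k in range(1, count + 1)
--     ]
-- ===== Notes on version B (the rewrite author's own statement) =====
-- stated objective: alternative
-- what changed: Replaces A's stateful decrement-with-carry loop by stateless floor-div/mod arithmetic on an absolute month index (year*12 + month-1), computing each output element independently.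
-- outside the precondition, e.g. on _get_prior_months('2020-00', 2): A returns ['2020--1', '2020--2'], B returns ['2019-11', '2019-10']
import Mathlib
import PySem

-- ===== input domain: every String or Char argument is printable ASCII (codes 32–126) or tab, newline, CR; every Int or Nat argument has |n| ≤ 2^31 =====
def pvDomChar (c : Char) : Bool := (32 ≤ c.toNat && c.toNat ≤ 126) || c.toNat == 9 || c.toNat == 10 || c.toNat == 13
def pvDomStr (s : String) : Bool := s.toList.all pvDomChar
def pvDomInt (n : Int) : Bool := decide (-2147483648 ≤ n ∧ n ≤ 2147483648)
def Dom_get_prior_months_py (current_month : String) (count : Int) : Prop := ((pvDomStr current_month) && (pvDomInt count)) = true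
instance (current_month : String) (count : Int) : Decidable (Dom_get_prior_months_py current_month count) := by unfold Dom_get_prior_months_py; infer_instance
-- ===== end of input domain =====

-- B replaces A's per-step decrement-with-carry by independent floor-div/mod arithmetic on an
-- absolute month index (objective: alternative/idiomatic; same O(count) cost).

-- shared formatting helper: f"{y:04d}-{m:02d}"  (Python's :0Nd = str(n).zfill(N))
def pvFmt (y m : Int) : String :=
  String.ofList (PySem.Chars.zfill (PySem.Int.toChars y) 4 ++ '-' :: PySem.Chars.zfill (PySem.Int.toChars m) 2)

-- ===== PORT A =====
-- the 'for _ in range(count)' loop of A, state (year, month, prior)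
def pvLoopA : Nat → Int → Int → List String → List String
  | 0, _, _, acc => acc
  | n+1, y, m, acc =>
    let m1 := m - 1
    if m1 = 0 then pvLoopA n (y - 1) 12 (acc ++ [pvFmt (y - 1) 12])
    else pvLoopA n y m1 (acc ++ [pvFmt y m1])

def get_prior_months_py (current_month : String) (count : Int) : List String :=
  match PySem.Int.ofStr? (PySem.Str.slice current_month none (some 4)),
        PySem.Int.ofStr? (PySem.Str.slice current_month (some 5) (some 7)) with
  | some y, some m => pvLoopA count.toNat y m []
  | _, _ => []   -- Python raises ValueError here; excluded by Pre_

-- ===== PORT B =====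
def get_prior_months_py_alt (current_month : String) (count : Int) : List String :=
  match PySem.Int.ofStr? (PySem.Str.slice current_month none (some 4)) with
  | none => []   -- Python raises ValueError here; excluded by Pre_
  | some y =>
    match PySem.Int.ofStr? (PySem.Str.slice current_month (some 5) (some 7)) with
    | none => []   -- Python raises ValueError here; excluded by Pre_
    | some m =>
      let total := y * 12 + (m - 1)
      (PySem.List.pyRange 1 (count + 1) 1).map (fun k =>
        pvFmt (PySem.Int.floordiv (total - k) 12) (PySem.Int.mod (total - k) 12 + 1))

-- ===== PRECONDITION & SPEC =====
-- Pre_ excludes inputs whose year/month fields do not parse as ints (A raises ValueError) and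
-- parseable inputs whose month field is outside 1..12 — malformed YYYY-MM strings, on which A's
-- carry-loop output (e.g. "2020--1" for month 00) is an accident of its implementation.
def Pre_get_prior_months_py (current_month : String) (count : Int) : Prop :=
  (PySem.Int.ofStr? (PySem.Str.slice current_month none (some 4))).isSome = true ∧
  1 ≤ (PySem.Int.ofStr? (PySem.Str.slice current_month (some 5) (some 7))).getD 0 ∧
  (PySem.Int.ofStr? (PySem.Str.slice current_month (some 5) (some 7))).getD 0 ≤ 12
instance (current_month : String) (count : Int) : Decidable (Pre_get_prior_months_py current_month count) := by
  unfold Pre_get_prior_months_py; infer_instance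

def pvWitness_get_prior_months_py : String × Int := ("1999-01", 4)

def Spec_get_prior_months_py (current_month : String) (count : Int) (out : List String) : Prop := out = get_prior_months_py_alt current_month count
instance (current_month : String) (count : Int) (out : List String) : Decidable (Spec_get_prior_months_py current_month count out) := by unfold Spec_get_prior_months_py; infer_instance

-- ===== CLAIM (what is proved, stated in full; the proofs are below) =====
def Claim_equal_get_prior_months_py : Prop := ∀ (current_month : String) (count : Int), Dom_get_prior_months_py current_month count → Pre_get_prior_months_py current_month count → Spec_get_prior_months_py current_month count (get_prior_months_py current_month count)

-- ===== LEMMAS AND PROOFS =====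

-- one carry step of A equals one divmod step at the absolute index t = y*12 + (m-1)
lemma pvStep_fd (y m : Int) (h1 : 1 ≤ m) (h2 : m ≤ 12) :
    (if m - 1 = 0 then (y - 1 : Int) else y) =
      PySem.Int.floordiv (y * 12 + (m - 1) - 1) 12 ∧
    (if m - 1 = 0 then (12 : Int) else m - 1) =
      PySem.Int.mod (y * 12 + (m - 1) - 1) 12 + 1 := by
  rw [PySem.Int.floordiv_eq_ediv_of_pos (a := y * 12 + (m - 1) - 1) (by omega),
      PySem.Int.mod_eq_emod_of_pos (a := y * 12 + (m - 1) - 1) (by omega)]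
  constructor <;> split_ifs <;> omega

lemma pvLoopA_eq : ∀ (n : Nat) (y m : Int), 1 ≤ m → m ≤ 12 → ∀ (acc : List String),
    pvLoopA n y m acc = acc ++ (List.range n).map (fun (k : Nat) =>
      pvFmt (PySem.Int.floordiv (y * 12 + (m - 1) - ((k : Int) + 1)) 12)
            (PySem.Int.mod (y * 12 + (m - 1) - ((k : Int) + 1)) 12 + 1)) := by
  intro n
  induction n with
  | zero => intro y m _ _ acc; simp [pvLoopA]
  | succ n ih =>
    intro y m h1 h2 acc
    obtain ⟨hfd, hmd⟩ := pvStep_fd y m h1 h2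
    have step : ∀ (y' m' : Int), y' = (if m - 1 = 0 then y - 1 else y) →
        m' = (if m - 1 = 0 then 12 else m - 1) →
        pvLoopA n y' m' (acc ++ [pvFmt y' m']) =
          acc ++ (List.range (n + 1)).map (fun (k : Nat) =>
            pvFmt (PySem.Int.floordiv (y * 12 + (m - 1) - ((k : Int) + 1)) 12)
                  (PySem.Int.mod (y * 12 + (m - 1) - ((k : Int) + 1)) 12 + 1)) := by
      intro y' m' hy hm
      have hb1 : 1 ≤ m' := by rw [hm]; split_ifs <;> omega
      have hb2 : m' ≤ 12 := by rw [hm]; split_ifs <;> omega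
      have ht : y' * 12 + (m' - 1) = y * 12 + (m - 1) - 1 := by
        rw [hy, hm]; split_ifs <;> omega
      have hhead : pvFmt y' m' =
          pvFmt (PySem.Int.floordiv (y * 12 + (m - 1) - 1) 12)
                (PySem.Int.mod (y * 12 + (m - 1) - 1) 12 + 1) := by
        rw [hy, hm] at *; rw [← hfd, ← hmd]
      rw [ih y' m' hb1 hb2, List.range_succ_eq_map, List.map_cons, List.map_map,
          List.append_assoc, List.singleton_append, ht]
      congr 1
      rw [hhead]
      congr 1
      apply List.map_congr_left
      intro k _
      simp only [Function.comp_apply]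
      have harg : y * 12 + (m - 1) - 1 - ((k : Int) + 1)
          = y * 12 + (m - 1) - (((Nat.succ k : Nat) : Int) + 1) := by push_cast; ring
      rw [harg]
    by_cases hm0 : m - 1 = 0
    · rw [show pvLoopA (n+1) y m acc = pvLoopA n (y-1) 12 (acc ++ [pvFmt (y-1) 12]) by
        simp [pvLoopA, hm0]]
      exact step _ _ (by simp [hm0]) (by simp [hm0])
    · rw [show pvLoopA (n+1) y m acc = pvLoopA n y (m-1) (acc ++ [pvFmt y (m-1)]) by
        simp [pvLoopA, hm0]]
      exact step _ _ (by simp [hm0]) (by simp [hm0])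

lemma pvRange_shape (c : Int) :
    PySem.List.pyRange 1 (c + 1) 1 = (List.range c.toNat).map (fun (k : Nat) => 1 + (k : Int)) := by
  rw [PySem.List.pyRange_one]
  norm_num

-- ===== VERDICT (by name: the statement is the Claim_ definition above) =====
theorem get_prior_months_py_spec : Claim_equal_get_prior_months_py := by
  intro cm count _ hpre
  obtain ⟨h4, hm1, hm2⟩ := hpre
  unfold Spec_get_prior_months_py get_prior_months_py get_prior_months_py_alt
  obtain ⟨y, hy⟩ := Option.isSome_iff_exists.mp h4
  cases hm : PySem.Int.ofStr? (PySem.Str.slice cm (some 5) (some 7)) with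
  | none => rw [hm] at hm1; norm_num at hm1
  | some m =>
    rw [hm] at hm1 hm2
    simp only [Option.getD_some] at hm1 hm2
    rw [hy]
    dsimp only
    rw [pvLoopA_eq count.toNat y m hm1 hm2 [], pvRange_shape, List.map_map, List.nil_append]
    apply List.map_congr_left
    intro k _
    simp only [Function.comp_apply]
    have harg : y * 12 + (m - 1) - ((k : Int) + 1) = y * 12 + (m - 1) - (1 + (k : Int)) := by ring
    rw [harg]
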